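-- pv_equiv track=rewrite | github.com/JacksonW1025/autopilot_lab | src/linearity_analysis/linearity_analysis/in_depth_analysis.py | choose_primary_driver
-- ===== SOURCE A (Python) =====
-- PRIMARY_DRIVER_PRIORITY = [
--     "feature_collinearity",
--     "mode_mixture",
--     "throttle",
--     "stratification",
-- ]
--
-- def choose_primary_driver(drivers: list[str]) -> str:
--     unique = []
--     for driver in drivers:
--         if driver not in unique:
--             unique.append(driver)
--     for driver in PRIMARY_DRIVER_PRIORITY:
--         if driver in unique:
--             return driver
--     return "other" if unique else "none"
-- ===== SOURCE B (Python) =====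
-- PRIMARY_DRIVER_PRIORITY = [
--     "feature_collinearity",
--     "mode_mixture",
--     "throttle",
--     "stratification",
-- ]
--
-- def choose_primary_driver(drivers: list[str]) -> str:
--     ranks = {d: i for i, d in enumerate(PRIMARY_DRIVER_PRIORITY)}
--     best = None
--     for driver in drivers:
--         r = ranks.get(driver)
--         if r is not None and (best is None or r < best):
--             best = r
--     if best is not None:
--         return PRIMARY_DRIVER_PRIORITY[best]
--     return "other" if drivers else "none"
-- ===== Notes on version B (the rewrite author's own statement) =====
-- stated objective: faster
-- what changed: Replaces A's quadratic dedup pass plus a scan of the priority list with membership tests by a single pass over drivers keeping the running minimum priority rank from a rank table, then indexing the priority list once.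
import Mathlib
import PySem

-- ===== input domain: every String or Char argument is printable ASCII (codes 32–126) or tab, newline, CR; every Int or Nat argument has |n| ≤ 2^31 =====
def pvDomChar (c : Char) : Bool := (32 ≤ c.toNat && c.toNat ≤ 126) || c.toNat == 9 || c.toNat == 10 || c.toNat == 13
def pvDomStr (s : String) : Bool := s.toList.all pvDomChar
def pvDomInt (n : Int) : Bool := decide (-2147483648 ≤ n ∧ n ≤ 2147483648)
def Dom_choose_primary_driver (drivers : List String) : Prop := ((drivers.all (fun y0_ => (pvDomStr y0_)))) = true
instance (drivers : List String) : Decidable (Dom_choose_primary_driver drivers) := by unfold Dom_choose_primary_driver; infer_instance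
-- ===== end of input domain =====

-- B replaces A's dedup pass + priority-list scan by a single pass over drivers keeping a running minimum rank (alternative decomposition, same exact result).


-- ===== PORT A =====
def PRIMARY_DRIVER_PRIORITY : List String :=
  ["feature_collinearity", "mode_mixture", "throttle", "stratification"]

-- the dedup loop of A: for driver in drivers: if driver not in unique: unique.append(driver)
def pvBuildUnique : List String → List String → List String
  | [], u => u
  | d :: ds, u => if u.contains d then pvBuildUnique ds u else pvBuildUnique ds (u ++ [d])

-- the priority scan of A: for driver in PRIMARY_DRIVER_PRIORITY: if driver in unique: return driver
def pvScanPriority : List String → List String → Option String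
  | [], _ => none
  | p :: ps, unique => if unique.contains p then some p else pvScanPriority ps unique

def choose_primary_driver (drivers : List String) : String :=
  let unique := pvBuildUnique drivers []
  match pvScanPriority PRIMARY_DRIVER_PRIORITY unique with
  | some d => d
  | none => if unique.isEmpty then "none" else "other"

-- ===== PORT B =====
-- ranks = {d: i for i, d in enumerate(PRIMARY_DRIVER_PRIORITY)}
def pvRanks : PySem.Dict String Int :=
  (PySem.List.enumerate PRIMARY_DRIVER_PRIORITY).foldl (fun acc p => acc.insert p.2 p.1) PySem.Dict.empty

def choose_primary_driver_alt (drivers : List String) : String :=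
  let best : Option Int := drivers.foldl (fun best driver =>
    match pvRanks.get? driver with
    | some r => match best with
      | none => some r
      | some b => if r < b then some r else some b
    | none => best) none
  match best with
  | some r => (PySem.List.pyGet? PRIMARY_DRIVER_PRIORITY r).getD ""  -- index always in range in B; IndexError impossible
  | none => if drivers.isEmpty then "none" else "other"

-- ===== PRECONDITION & SPEC =====
def Spec_choose_primary_driver (drivers : List String) (out : String) : Prop := out = choose_primary_driver_alt drivers
instance (drivers : List String) (out : String) : Decidable (Spec_choose_primary_driver drivers out) := by unfold Spec_choose_primary_driver; infer_instance

-- ===== CLAIM (what is proved, stated in full; the proofs are below) =====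
def Claim_equal_choose_primary_driver : Prop := ∀ (drivers : List String), Dom_choose_primary_driver drivers → Spec_choose_primary_driver drivers (choose_primary_driver drivers)

-- ===== LEMMAS AND PROOFS =====

-- membership in A's dedup accumulator
theorem pvBuildUnique_mem (ds : List String) : ∀ (u : List String) (x : String),
    x ∈ pvBuildUnique ds u ↔ x ∈ u ∨ x ∈ ds := by
  induction ds with
  | nil => simp [pvBuildUnique]
  | cons d ds ih =>
    intro u x
    simp only [pvBuildUnique]
    split_ifs with h
    · rw [ih]
      have hd : d ∈ u := by simpa using h
      constructor
      · rintro (h1 | h1) <;> simp [h1]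
      · rintro (h1 | h1)
        · exact Or.inl h1
        · rcases List.mem_cons.mp h1 with h2 | h2
          · exact Or.inl (h2 ▸ hd)
          · exact Or.inr h2
    · rw [ih]
      simp [or_assoc, List.mem_append]

theorem pvBuildUnique_ne_nil (ds : List String) : ∀ (u : List String), u ≠ [] → pvBuildUnique ds u ≠ [] := by
  induction ds with
  | nil => intro u h; simpa [pvBuildUnique] using h
  | cons d ds ih =>
    intro u h
    simp only [pvBuildUnique]
    split_ifs with hc
    · exact ih u h
    · exact ih (u ++ [d]) (by simp)

theorem pvBuildUnique_nil_iff (ds : List String) : pvBuildUnique ds [] = [] ↔ ds = [] := by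
  cases ds with
  | nil => simp [pvBuildUnique]
  | cons d ds =>
    simp only [pvBuildUnique, List.contains_eq_mem]
    simp only [List.not_mem_nil, decide_false, if_neg Bool.false_ne_true]
    constructor
    · intro h; exact absurd h (pvBuildUnique_ne_nil ds [d] (by simp))
    · intro h; cases h

-- option running-minimum combine
def pvOmin : Option Int → Option Int → Option Int
  | b, none => b
  | none, some r => some r
  | some b, some r => if r < b then some r else some b

theorem pvOmin_assoc (a b c : Option Int) : pvOmin (pvOmin a b) c = pvOmin a (pvOmin b c) := by
  rcases a with _ | a <;> rcases b with _ | b <;> rcases c with _ | c <;>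
    simp only [pvOmin] <;> (try split_ifs) <;> simp only [pvOmin] <;> (try split_ifs) <;>
    first | rfl | (exfalso; omega) | (congr 1; omega)

theorem pvOmin_none_left (x : Option Int) : pvOmin none x = x := by
  rcases x with _ | r <;> rfl

-- the minimum rank present in ds, written as a membership if-chain
def pvMif (ds : List String) : Option Int :=
  if "feature_collinearity" ∈ ds then some 0
  else if "mode_mixture" ∈ ds then some 1
  else if "throttle" ∈ ds then some 2
  else if "stratification" ∈ ds then some 3
  else none

theorem pvRanks_eq : pvRanks = PySem.Dict.mk
    [("feature_collinearity", 0), ("mode_mixture", 1), ("throttle", 2), ("stratification", 3)] := by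
  decide

theorem pvMif_cons (d : String) (ds : List String) :
    pvMif (d :: ds) = pvOmin (pvRanks.get? d) (pvMif ds) := by
  by_cases h0 : d = "feature_collinearity"
  · subst h0
    rw [show pvRanks.get? "feature_collinearity" = some 0 from by decide]
    simp only [pvMif, List.mem_cons]
    simp
    split_ifs <;> decide
  · by_cases h1 : d = "mode_mixture"
    · subst h1
      rw [show pvRanks.get? "mode_mixture" = some 1 from by decide]
      simp only [pvMif, List.mem_cons]
      simp
      split_ifs <;> decide
    · by_cases h2 : d = "throttle"
      · subst h2
        rw [show pvRanks.get? "throttle" = some 2 from by decide]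
        simp only [pvMif, List.mem_cons]
        simp
        split_ifs <;> decide
      · by_cases h3 : d = "stratification"
        · subst h3
          rw [show pvRanks.get? "stratification" = some 3 from by decide]
          simp only [pvMif, List.mem_cons]
          simp
          split_ifs <;> decide
        · have hget : pvRanks.get? d = none := by
            rw [pvRanks_eq]
            simp [beq_iff_eq,
              Ne.symm h0, Ne.symm h1, Ne.symm h2, Ne.symm h3, PySem.Dict.get?]
          rw [hget, pvOmin_none_left]
          simp only [pvMif, List.mem_cons, Ne.symm h0, Ne.symm h1, Ne.symm h2, Ne.symm h3,
            false_or]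

def pvStep (best : Option Int) (driver : String) : Option Int :=
  match pvRanks.get? driver with
  | some r => match best with
    | none => some r
    | some b => if r < b then some r else some b
  | none => best

theorem pvStep_eq_omin (b : Option Int) (d : String) : pvStep b d = pvOmin b (pvRanks.get? d) := by
  rcases h : pvRanks.get? d with _ | r <;> rcases b with _ | bv <;> simp [pvStep, pvOmin, h]

theorem pvFold_char (ds : List String) : ∀ (b : Option Int),
    ds.foldl pvStep b = pvOmin b (pvMif ds) := by
  induction ds with
  | nil => intro b; simp [pvMif, pvOmin]
  | cons d ds ih =>
    intro b
    rw [List.foldl_cons, ih, pvStep_eq_omin, pvMif_cons, pvOmin_assoc]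

-- ===== VERDICT (by name: the statement is the Claim_ definition above) =====
theorem choose_primary_driver_spec : Claim_equal_choose_primary_driver := by
  intro drivers _
  show choose_primary_driver drivers = choose_primary_driver_alt drivers
  have hfold : drivers.foldl pvStep none = pvMif drivers := by
    rw [pvFold_char, pvOmin_none_left]
  have hstepeq : (fun (best : Option Int) (driver : String) =>
      match pvRanks.get? driver with
      | some r => match best with
        | none => some r
        | some b => if r < b then some r else some b
      | none => best) = pvStep := rfl
  have hmem : ∀ x, (pvBuildUnique drivers []).contains x = drivers.contains x := by
    intro x
    simp [List.contains_eq_mem, pvBuildUnique_mem]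
  have hempty : (pvBuildUnique drivers []).isEmpty = drivers.isEmpty := by
    rw [Bool.eq_iff_iff]
    simp [List.isEmpty_iff, pvBuildUnique_nil_iff]
  unfold choose_primary_driver choose_primary_driver_alt
  rw [hstepeq, hfold]
  simp only [pvScanPriority, PRIMARY_DRIVER_PRIORITY, pvMif, hmem, hempty,
    List.contains_eq_mem]
  split_ifs <;> simp_all <;> decide
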